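-- pv_equiv track=rewrite | github.com/YuqiJin0013/EC504 | HW6/problem2.py | directed_connected_components
-- ===== SOURCE A (Python) =====
-- def dfs(graph, node, visited, component):
--     visited.add(node)
--     component.append(node)
--     for neighbor in graph[node]:
--         if neighbor not in visited:
--             dfs(graph, neighbor, visited, component)
--
-- def directed_connected_components(graph):
--     visited = set()
--     components = []
--     for node in graph:
--         if node not in visited:
--             component = []
--             dfs(graph, node, visited, component)
--             components.append(component)
--
--     return components
-- ===== SOURCE B (Python) =====
-- def directed_connected_components(graph):
--     visited = set()
--     components = []
--     for node in graph:
--         if node not in visited: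
--             component = []
--             stack = [node]
--             while stack:
--                 x = stack.pop()
--                 if x in visited:
--                     continue
--                 visited.add(x)
--                 component.append(x)
--                 stack.extend(reversed(graph[x]))
--             components.append(component)
--     return components
-- ===== Notes on version B (the rewrite author's own statement) =====
-- stated objective: alternative
-- what changed: Replaces A's recursive helper dfs with an inlined iterative DFS using an explicit stack (mark visited at pop time, push neighbors in reversed order), producing the identical component lists and ordering.
import Mathlib
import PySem

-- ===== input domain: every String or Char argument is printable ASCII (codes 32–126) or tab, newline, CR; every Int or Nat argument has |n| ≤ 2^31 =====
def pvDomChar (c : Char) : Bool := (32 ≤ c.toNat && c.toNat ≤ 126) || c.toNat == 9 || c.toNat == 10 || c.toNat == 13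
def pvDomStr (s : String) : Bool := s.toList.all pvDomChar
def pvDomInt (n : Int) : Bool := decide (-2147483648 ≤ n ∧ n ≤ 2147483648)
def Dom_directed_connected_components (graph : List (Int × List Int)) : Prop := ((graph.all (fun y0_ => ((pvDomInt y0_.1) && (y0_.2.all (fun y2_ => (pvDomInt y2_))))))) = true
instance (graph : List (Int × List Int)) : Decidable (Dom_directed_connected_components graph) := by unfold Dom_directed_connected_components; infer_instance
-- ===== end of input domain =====

-- B replaces A's recursive helper `dfs` with an inlined iterative DFS over an explicit
-- stack (mark at pop, push neighbors reversed), same return value; objective: alternative.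

-- number of dictionary keys not yet visited — the termination measure of both DFS loops
def pvCnt (d : PySem.Dict Int (List Int)) (v : PySem.Set Int) : Nat :=
  ((PySem.Dict.keys d).filter (fun k => !(PySem.Set.contains v k))).length

theorem pvFilter_lt {p q : Int → Bool} (L : List Int) (x : Int) (hx : x ∈ L)
    (hqx : q x = false) (hpx : p x = true) (himp : ∀ a, q a = true → p a = true) :
    (L.filter q).length < (L.filter p).length := by
  induction L with
  | nil => cases hx
  | cons a t ih =>
    by_cases hax : a = x
    · subst hax
      simp only [List.filter_cons, hqx, hpx]
      exact Nat.lt_succ_of_le (List.monotone_filter_right _ himp).length_le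
    · have hxt : x ∈ t := by cases hx with | head => exact absurd rfl hax | tail _ h => exact h
      cases hqa : q a with
      | true =>
        simp only [List.filter_cons, hqa, himp a hqa]
        exact Nat.succ_lt_succ (ih hxt)
      | false =>
        simp only [List.filter_cons, hqa]
        cases hpa : p a with
        | true => exact Nat.lt_succ_of_lt (ih hxt)
        | false => exact ih hxt

theorem pvCnt_add_lt (d : PySem.Dict Int (List Int)) (v : PySem.Set Int) (x : Int)
    (hk : PySem.Dict.contains d x = true) (hv : PySem.Set.contains v x = false) :
    pvCnt d (PySem.Set.add v x) < pvCnt d v := by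
  unfold pvCnt
  refine pvFilter_lt _ x ((PySem.Dict.contains_iff_mem_keys d x).1 hk) ?_ ?_ ?_
  · simp [PySem.Set.mem_add]
  · simpa using hv
  · intro a ha
    simp only [Bool.not_eq_eq_eq_not, Bool.not_true, ← Bool.not_eq_true,
      PySem.Set.contains_iff, PySem.Set.mem_add] at *
    tauto

theorem pvCnt_add_eq_of_not_key (d : PySem.Dict Int (List Int)) (v : PySem.Set Int) (x : Int)
    (hk : PySem.Dict.contains d x = false) :
    pvCnt d (PySem.Set.add v x) = pvCnt d v := by
  unfold pvCnt
  congr 1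
  refine List.filter_congr ?_
  intro a ha
  have hax : a ≠ x := by
    intro h; subst h
    exact absurd ((PySem.Dict.contains_iff_mem_keys d a).2 ha) (by simp [hk])
  have : PySem.Set.contains (PySem.Set.add v x) a = PySem.Set.contains v a := by
    have h1 := PySem.Set.contains_iff (PySem.Set.add v x) a
    have h2 := PySem.Set.contains_iff v a
    have hmem : a ∈ PySem.Set.add v x ↔ a ∈ v := by
      rw [PySem.Set.mem_add]; exact ⟨fun h => h.resolve_right hax, Or.inl⟩
    cases hb : PySem.Set.contains (PySem.Set.add v x) a <;>
      cases hc : PySem.Set.contains v a <;> simp_all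
  rw [this]

-- ===== PORT A =====
-- A's recursive helper `dfs(graph, node, visited, component)`, threading (visited, component).
-- `fuel` is ONLY a structural-recursion guard (one unit per nesting level; the top call
-- passes more fuel than the recursion can ever be deep, so the 0-case is never reached).
-- `graph[node]` is ported as getD (exact under Pre_, which rules out Python's KeyError).
mutual
def pvDfs (d : PySem.Dict Int (List Int)) (fuel : Nat) (node : Int)
    (visited : PySem.Set Int) (component : List Int) : PySem.Set Int × List Int :=
  match fuel with
  | 0 => (visited, component)
  | fuel + 1 =>
    pvDfsNbrs d fuel (PySem.Dict.getD d node []) (PySem.Set.add visited node)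
      (component ++ [node])
termination_by (fuel, 0)

def pvDfsNbrs (d : PySem.Dict Int (List Int)) (fuel : Nat) (l : List Int)
    (visited : PySem.Set Int) (component : List Int) : PySem.Set Int × List Int :=
  match l with
  | [] => (visited, component)
  | n :: ns =>
    if PySem.Set.contains visited n then pvDfsNbrs d fuel ns visited component
    else
      let r := pvDfs d fuel n visited component
      pvDfsNbrs d fuel ns r.1 r.2
termination_by (fuel, l.length + 1)
end

def directed_connected_components (graph : List (Int × List Int)) : List (List Int) :=
  ((PySem.Dict.keys (PySem.Dict.ofList graph)).foldl
    (fun (st : PySem.Set Int × List (List Int)) node =>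
      if PySem.Set.contains st.1 node then st
      else
        let r := pvDfs (PySem.Dict.ofList graph)
          ((PySem.Dict.keys (PySem.Dict.ofList graph)).length + 1) node st.1 []
        (r.1, st.2 ++ [r.2]))
    (PySem.Set.empty, [])).2

-- ===== PORT B =====
-- B's `while stack:` loop; the stack is modelled with its TOP at the head, so Python's
-- `stack.extend(reversed(graph[x]))` followed by `stack.pop()` is `getD d x [] ++ rest`.
def pvStackLoop (d : PySem.Dict Int (List Int)) (stack : List Int)
    (visited : PySem.Set Int) (component : List Int) : PySem.Set Int × List Int :=
  match stack with
  | [] => (visited, component)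
  | x :: rest =>
    if PySem.Set.contains visited x then pvStackLoop d rest visited component
    else pvStackLoop d (PySem.Dict.getD d x [] ++ rest) (PySem.Set.add visited x)
      (component ++ [x])
termination_by (pvCnt d visited, stack.length)
decreasing_by
  · exact Prod.Lex.right _ (Nat.lt_succ_self _)
  · rename_i h
    cases hk : PySem.Dict.contains d x with
    | true =>
      exact Prod.Lex.left _ _ (pvCnt_add_lt d visited x hk (by simpa using h))
    | false =>
      rw [pvCnt_add_eq_of_not_key d visited x hk, PySem.Dict.getD_of_not_contains d ([] : List Int) hk]
      exact Prod.Lex.right _ (by simp)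

def directed_connected_components_alt (graph : List (Int × List Int)) : List (List Int) :=
  ((PySem.Dict.keys (PySem.Dict.ofList graph)).foldl
    (fun (st : PySem.Set Int × List (List Int)) node =>
      if PySem.Set.contains st.1 node then st
      else
        let r := pvStackLoop (PySem.Dict.ofList graph) [node] st.1 []
        (r.1, st.2 ++ [r.2]))
    (PySem.Set.empty, [])).2

-- ===== PRECONDITION & SPEC =====
-- Pre_ excludes exactly the graphs whose (effective) dict has an adjacency entry that is
-- not itself a key: there Python's `graph[neighbor]` raises KeyError (in A and in B alike).
def Pre_directed_connected_components (graph : List (Int × List Int)) : Prop :=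
  ∀ p ∈ (PySem.Dict.ofList graph).items, ∀ n ∈ p.2,
    n ∈ PySem.Dict.keys (PySem.Dict.ofList graph)
instance (graph : List (Int × List Int)) : Decidable (Pre_directed_connected_components graph) := by unfold Pre_directed_connected_components; infer_instance

def pvWitness_directed_connected_components : (List (Int × List Int)) :=
  [(0, [1]), (1, [0]), (2, [])]

def Spec_directed_connected_components (graph : List (Int × List Int)) (out : List (List Int)) : Prop := out = directed_connected_components_alt graph
instance (graph : List (Int × List Int)) (out : List (List Int)) : Decidable (Spec_directed_connected_components graph out) := by unfold Spec_directed_connected_components; infer_instance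

-- ===== CLAIM (what is proved, stated in full; the proofs are below) =====
def Claim_equal_directed_connected_components : Prop := ∀ (graph : List (Int × List Int)), Dom_directed_connected_components graph → Pre_directed_connected_components graph → Spec_directed_connected_components graph (directed_connected_components graph)

-- ===== LEMMAS AND PROOFS =====

-- visited only grows through the recursive DFS
theorem pvVisited_mono (d : PySem.Dict Int (List Int)) : ∀ fuel : Nat,
    (∀ x v c y, y ∈ v → y ∈ (pvDfs d fuel x v c).1) ∧
    (∀ l v c y, y ∈ v → y ∈ (pvDfsNbrs d fuel l v c).1) := by
  intro fuel
  induction fuel with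
  | zero =>
    refine ⟨fun x v c y hy => by simpa [pvDfs] using hy, ?_⟩
    intro l
    induction l with
    | nil => intro v c y hy; simpa [pvDfsNbrs] using hy
    | cons n ns ih =>
      intro v c y hy
      rw [pvDfsNbrs]
      split
      · exact ih v c y hy
      · exact ih _ _ y (by simpa [pvDfs] using hy)
  | succ f ihf =>
    have hdfs : ∀ x v c y, y ∈ v → y ∈ (pvDfs d (f+1) x v c).1 := by
      intro x v c y hy
      rw [pvDfs]
      exact ihf.2 _ _ _ y (by rw [PySem.Set.mem_add]; exact Or.inl hy)
    refine ⟨hdfs, ?_⟩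
    intro l
    induction l with
    | nil => intro v c y hy; simpa [pvDfsNbrs] using hy
    | cons n ns ih =>
      intro v c y hy
      rw [pvDfsNbrs]
      split
      · exact ih v c y hy
      · exact ih _ _ y (hdfs n v c y hy)

theorem pvCnt_subset_le (d : PySem.Dict Int (List Int)) (v w : PySem.Set Int)
    (h : ∀ y ∈ v, y ∈ w) : pvCnt d w ≤ pvCnt d v := by
  unfold pvCnt
  refine (List.monotone_filter_right _ ?_).length_le
  intro a ha
  simp only [Bool.not_eq_eq_eq_not, Bool.not_true, ← Bool.not_eq_true,
    PySem.Set.contains_iff] at *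
  exact fun hav => ha (h a hav)

-- the bridge: the stack loop run from `x :: s` is the recursive dfs at `x` followed by
-- the stack loop on `s`, provided the fuel exceeds the number of unvisited keys
theorem pvBridge (d : PySem.Dict Int (List Int)) : ∀ fuel : Nat,
    (∀ x v c s, x ∉ v → pvCnt d v < fuel →
      pvStackLoop d (x :: s) v c =
        pvStackLoop d s (pvDfs d fuel x v c).1 (pvDfs d fuel x v c).2) ∧
    (∀ l v c s, pvCnt d v < fuel →
      pvStackLoop d (l ++ s) v c =
        pvStackLoop d s (pvDfsNbrs d fuel l v c).1 (pvDfsNbrs d fuel l v c).2) := by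
  intro fuel
  induction fuel with
  | zero => exact ⟨fun _ _ _ _ _ h => absurd h (by omega), fun _ _ _ _ h => absurd h (by omega)⟩
  | succ f ihf =>
    have hcv : ∀ (x : Int) (v : PySem.Set Int), PySem.Set.contains v x = false ↔ x ∉ v := by
      intro x v
      constructor
      · intro h hm; rw [(PySem.Set.contains_iff v x).2 hm] at h; exact absurd h (by decide)
      · intro h; cases hb : PySem.Set.contains v x with
        | true => exact absurd ((PySem.Set.contains_iff v x).1 hb) h
        | false => rfl
    have hdfs : ∀ x v c s, x ∉ v → pvCnt d v < f + 1 →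
        pvStackLoop d (x :: s) v c =
          pvStackLoop d s (pvDfs d (f+1) x v c).1 (pvDfs d (f+1) x v c).2 := by
      intro x v c s hx hc
      rw [pvDfs, pvStackLoop, if_neg (fun ht => hx ((PySem.Set.contains_iff v x).1 ht))]
      cases hk : PySem.Dict.contains d x with
      | true =>
        exact ihf.2 _ _ _ _ (lt_of_lt_of_le (pvCnt_add_lt d v x hk ((hcv x v).2 hx)) (by omega))
      | false =>
        rw [PySem.Dict.getD_of_not_contains d ([] : List Int) hk]
        simp [pvDfsNbrs]
    refine ⟨hdfs, ?_⟩
    intro l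
    induction l with
    | nil => intro v c s hc; simp [pvDfsNbrs]
    | cons n ns ih =>
      intro v c s hc
      rw [pvDfsNbrs]
      split
      · rename_i h
        have : pvStackLoop d ((n :: ns) ++ s) v c = pvStackLoop d (ns ++ s) v c := by
          rw [List.cons_append, pvStackLoop, if_pos h]
        rw [this]; exact ih v c s hc
      · rename_i h
        have hx : n ∉ v := (hcv n v).1 (by simpa using h)
        have h1 : pvStackLoop d ((n :: ns) ++ s) v c =
            pvStackLoop d (ns ++ s) (pvDfs d (f+1) n v c).1 (pvDfs d (f+1) n v c).2 :=
          hdfs n v c (ns ++ s) hx hc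
        rw [h1]
        exact ih _ _ s (lt_of_le_of_lt
          (pvCnt_subset_le d v _ (fun y hy => (pvVisited_mono d (f+1)).1 n v c y hy)) hc)

theorem pvCnt_lt_keys_succ (d : PySem.Dict Int (List Int)) (v : PySem.Set Int) :
    pvCnt d v < (PySem.Dict.keys d).length + 1 :=
  Nat.lt_succ_of_le (List.length_filter_le _ _)

-- ===== VERDICT (by name: the statement is the Claim_ definition above) =====
theorem directed_connected_components_spec : Claim_equal_directed_connected_components := by
  intro graph _ _
  unfold Spec_directed_connected_components
  unfold directed_connected_components directed_connected_components_alt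
  have hstep : (fun (st : PySem.Set Int × List (List Int)) node =>
      if PySem.Set.contains st.1 node then st
      else
        let r := pvDfs (PySem.Dict.ofList graph)
          ((PySem.Dict.keys (PySem.Dict.ofList graph)).length + 1) node st.1 []
        (r.1, st.2 ++ [r.2])) =
      (fun (st : PySem.Set Int × List (List Int)) node =>
      if PySem.Set.contains st.1 node then st
      else
        let r := pvStackLoop (PySem.Dict.ofList graph) [node] st.1 []
        (r.1, st.2 ++ [r.2])) := by
    funext st node
    cases hb : PySem.Set.contains st.1 node with
    | true => simp
    | false =>
      have hx : node ∉ st.1 := by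
        intro hm; rw [(PySem.Set.contains_iff st.1 node).2 hm] at hb; exact absurd hb (by decide)
      have h := (pvBridge (PySem.Dict.ofList graph)
        ((PySem.Dict.keys (PySem.Dict.ofList graph)).length + 1)).1 node st.1 [] [] hx
        (pvCnt_lt_keys_succ _ _)
      simp only [if_false, Bool.false_eq_true]
      rw [show ([node] : List Int) = node :: [] from rfl] at h ⊢
      rw [h, pvStackLoop]
  rw [hstep]
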